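-- pv_equiv track=rewrite | github.com/oasisresearchlab/crossdisciplinary-embeddings | appcode/app.py | process_ctx_list
-- ===== SOURCE A (Python) =====
-- def process_ctx_list(ctx_list): #TODO how to choose "most relevant" context for a retrieved word?
--     #sent_limit = 2 # at most # sentences per paper, if next paper exists
--     #sec_limit = 1 # at most # sentences per section, if next section exists
--     #num_paper = 5
--     n_sent_per_paper = 2 # include up to # sentences per paper
--     n_ctx_per_word = 5
--     ret_ctx_list = []
--     sent_cnt = 0
--     prev_paper_id = None
--     ctx_obj = None
--     sent_set = set() #prevent providing same sentences multiple times
--     for ctx_row in sorted(ctx_list, key=lambda r: r['paper_id']):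
--         paper_id = ctx_row['paper_id']
--         if paper_id == prev_paper_id and sent_cnt >= n_sent_per_paper:
--             continue
--
--         if paper_id != prev_paper_id: # reset per-paper counter
--             sent_cnt = 0
--
--         if ctx_row['sent'] in sent_set:
--             continue
--         ret_ctx_list.append(ctx_row)
--         sent_set.add(ctx_row['sent'])
--         sent_cnt += 1
--         if len(ret_ctx_list) >= n_ctx_per_word:
--             break
--
--         prev_paper_id = paper_id
--     return ret_ctx_list
-- ===== SOURCE B (Python) =====
-- def process_ctx_list(ctx_list):
--     # Bucket rows by paper_id in a dict (no sort of the rows), then walk the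
--     # paper ids in ascending order, taking from each bucket under one combined
--     # budget min(2, 5 - len(out)) instead of two separate caps with breaks.
--     by_paper = {}
--     for row in ctx_list:
--         by_paper[row['paper_id']] = by_paper.get(row['paper_id'], []) + [row]
--     out = []
--     seen = set()
--     for pid in sorted(by_paper):
--         budget = min(2, 5 - len(out))
--         for row in by_paper[pid]:
--             if budget == 0:
--                 break
--             if row['sent'] not in seen:
--                 out.append(row)
--                 seen.add(row['sent'])
--                 budget -= 1
--         if len(out) == 5:
--             break
--     return out
-- ===== Notes on version B (the rewrite author's own statement) =====
-- stated objective: alternative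
-- what changed: Instead of A's stable sort of all rows followed by one flat pass with lazily-updated prev_paper_id/sent_cnt state, B buckets the rows by paper_id in a dict in one pass, sorts only the distinct paper ids, and drains each bucket under a single combined budget min(2, 5 - len(out)) that replaces A's two separate caps and mid-loop break.
import Mathlib
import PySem

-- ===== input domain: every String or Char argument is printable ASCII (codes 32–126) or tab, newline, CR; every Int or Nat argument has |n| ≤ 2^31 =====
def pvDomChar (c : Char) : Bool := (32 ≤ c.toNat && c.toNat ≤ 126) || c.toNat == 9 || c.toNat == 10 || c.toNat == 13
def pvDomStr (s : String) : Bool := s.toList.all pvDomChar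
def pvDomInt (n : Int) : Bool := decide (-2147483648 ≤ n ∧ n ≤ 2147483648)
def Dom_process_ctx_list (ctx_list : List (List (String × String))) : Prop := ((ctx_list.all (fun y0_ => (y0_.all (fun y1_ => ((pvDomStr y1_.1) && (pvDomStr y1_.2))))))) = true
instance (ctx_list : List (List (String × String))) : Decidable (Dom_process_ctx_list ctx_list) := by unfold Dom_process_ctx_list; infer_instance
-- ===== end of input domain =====

-- B replaces A's full stable sort of the rows + one flat pass with lazily-updated
-- prev_paper_id/sent_cnt state by dict bucketing (only the distinct paper ids are
-- sorted) and a single combined budget min(2, 5 - len(out)) per bucket (alternative).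

-- row[k]: total stand-in for the Python dict lookup; exact under Pre_ (key present,
-- keys distinct); Python raises KeyError exactly where get? = none, excluded by Pre_.
def pvGetKey (r : List (String × String)) (k : String) : String :=
  ((PySem.Dict.ofList r).get? k).getD ""

def pvPid (r : List (String × String)) : String := pvGetKey r "paper_id"

def pvSent (r : List (String × String)) : String := pvGetKey r "sent"

-- ===== PORT A =====
-- the for-loop of A over the sorted rows: state (ret, sent_cnt, prev_paper_id, sent_set)
def pvLoopA : List (List (String × String)) → List (List (String × String)) → Int →
    Option String → PySem.Set String → List (List (String × String))
  | [], ret, _, _, _ => ret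
  | r :: rs, ret, cnt, prev, seen =>
    let pid := pvPid r
    if some pid = prev ∧ cnt ≥ 2 then pvLoopA rs ret cnt prev seen
    else
      let cnt1 := if some pid ≠ prev then 0 else cnt
      let s := pvSent r
      if PySem.Set.contains seen s then pvLoopA rs ret cnt1 prev seen
      else
        let ret1 := ret ++ [r]
        let seen1 := PySem.Set.add seen s
        let cnt2 := cnt1 + 1
        if ret1.length ≥ 5 then ret1
        else pvLoopA rs ret1 cnt2 (some pid) seen1

def process_ctx_list (ctx_list : List (List (String × String))) : List (List (String × String)) :=
  pvLoopA (PySem.List.sorted ctx_list (fun r => pvPid r) false) [] 0 none []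

-- ===== PORT B =====
-- by_paper[row['paper_id']] = by_paper.get(row['paper_id'], []) + [row]
def pvBuckets (ctx_list : List (List (String × String))) :
    PySem.Dict String (List (List (String × String))) :=
  ctx_list.foldl (fun d r => d.modify (pvPid r) [] (fun v => v ++ [r])) PySem.Dict.empty

-- B's inner loop over one bucket under the combined budget
def pvTakeB : List (List (String × String)) → List (List (String × String)) → Int →
    PySem.Set String → List (List (String × String)) × PySem.Set String
  | [], out, _, seen => (out, seen)
  | r :: rs, out, b, seen =>
    if b = 0 then (out, seen)
    else if PySem.Set.contains seen (pvSent r) then pvTakeB rs out b seen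
    else pvTakeB rs (out ++ [r]) (b - 1) (PySem.Set.add seen (pvSent r))

-- B's outer loop over the sorted paper ids
def pvLoopB (d : PySem.Dict String (List (List (String × String)))) :
    List String → List (List (String × String)) → PySem.Set String →
    List (List (String × String))
  | [], out, _ => out
  | k :: ks, out, seen =>
    let t := pvTakeB (d.getD k []) out (min 2 (5 - (out.length : Int))) seen
    if t.1.length = 5 then t.1 else pvLoopB d ks t.1 t.2

def process_ctx_list_alt (ctx_list : List (List (String × String))) : List (List (String × String)) :=
  let d := pvBuckets ctx_list
  pvLoopB d (PySem.List.sorted (PySem.Dict.keys d) (fun k => k) false) [] []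

-- ===== PRECONDITION & SPEC =====
-- A raises KeyError when a row lacks 'paper_id' (sort key) or lacks 'sent' on a row the
-- loop reads; Pre_ also excludes rows with duplicate keys (a defensible corner: Python's
-- dict constructor overwrites, so the association-list reading is ambiguous) and, slightly
-- narrower than the KeyError reason, rows lacking 'sent' that A's caps skip before reading
-- 'sent' — there A returns, and B returns the same list (see the cited example).
def Pre_process_ctx_list (ctx_list : List (List (String × String))) : Prop :=
  ∀ r ∈ ctx_list, (r.map Prod.fst).Nodup ∧ "paper_id" ∈ r.map Prod.fst ∧ "sent" ∈ r.map Prod.fst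
instance (ctx_list : List (List (String × String))) : Decidable (Pre_process_ctx_list ctx_list) := by
  unfold Pre_process_ctx_list; infer_instance

def pvWitness_process_ctx_list : (List (List (String × String))) :=
  [[("paper_id", "a"), ("sent", "x")], [("paper_id", "b"), ("sent", "y")]]

def Spec_process_ctx_list (ctx_list : List (List (String × String))) (out : List (List (String × String))) : Prop := out = process_ctx_list_alt ctx_list
instance (ctx_list : List (List (String × String))) (out : List (List (String × String))) : Decidable (Spec_process_ctx_list ctx_list out) := by unfold Spec_process_ctx_list; infer_instance

-- ===== CLAIM (what is proved, stated in full; the proofs are below) =====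
def Claim_equal_process_ctx_list : Prop := ∀ (ctx_list : List (List (String × String))), Dom_process_ctx_list ctx_list → Pre_process_ctx_list ctx_list → Spec_process_ctx_list ctx_list (process_ctx_list ctx_list)

-- ===== LEMMAS AND PROOFS =====

-- pvTakeB with budget 0 takes nothing
lemma pvTakeB_zero (g : List (List (String × String))) (out : List (List (String × String)))
    (seen : PySem.Set String) : pvTakeB g out 0 seen = (out, seen) := by
  cases g with
  | nil => rfl
  | cons r rs => simp [pvTakeB]

-- A skips the whole remaining group once the per-paper cap is reached
lemma pvLoopA_skip (g : List (List (String × String))) :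
    ∀ (rest ret : List (List (String × String))) (cnt : Int) (seen : PySem.Set String) (p : String),
    (∀ r ∈ g, pvPid r = p) → cnt ≥ 2 →
    pvLoopA (g ++ rest) ret cnt (some p) seen = pvLoopA rest ret cnt (some p) seen := by
  induction g with
  | nil => intro rest ret cnt seen p _ _; rfl
  | cons r rs ih =>
    intro rest ret cnt seen p hp h2
    have hpr : pvPid r = p := hp r (by simp)
    have hcond : (some (pvPid r) = some p ∧ cnt ≥ 2) := ⟨by rw [hpr], h2⟩
    simp only [List.cons_append, pvLoopA, if_pos hcond]
    exact ih rest ret cnt seen p (fun x hx => hp x (by simp [hx])) h2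

-- A's flat loop across one group whose rows all carry paper_id p behaves as B's
-- budgeted inner loop: the budget min(2-taken, 5-len) combines both caps
lemma pvLoopA_group (g : List (List (String × String))) :
    ∀ (rest ret : List (List (String × String))) (cnt taken : Int) (prev : Option String)
      (seen : PySem.Set String) (p : String),
    (∀ r ∈ g, pvPid r = p) →
    ret.length ≤ 4 → 0 ≤ taken → taken ≤ 2 →
    ((prev ≠ some p ∧ taken = 0) ∨ (prev = some p ∧ cnt = taken)) →
    (if (pvTakeB g ret (min (2 - taken) (5 - (ret.length : Int))) seen).1.length = 5 then
        pvLoopA (g ++ rest) ret cnt prev seen =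
          (pvTakeB g ret (min (2 - taken) (5 - (ret.length : Int))) seen).1
      else
        (pvTakeB g ret (min (2 - taken) (5 - (ret.length : Int))) seen).1.length ≤ 4 ∧
        ∃ cnt' prev', (prev' = prev ∨ prev' = some p) ∧
          pvLoopA (g ++ rest) ret cnt prev seen =
            pvLoopA rest (pvTakeB g ret (min (2 - taken) (5 - (ret.length : Int))) seen).1
              cnt' prev' (pvTakeB g ret (min (2 - taken) (5 - (ret.length : Int))) seen).2) := by
  induction g with
  | nil =>
    intro rest ret cnt taken prev seen p _ hlen _ _ _
    have : ret.length ≠ 5 := by omega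
    simp only [pvTakeB, List.nil_append, this, if_false]
    exact ⟨hlen, cnt, prev, Or.inl rfl, rfl⟩
  | cons r rs ih =>
    intro rest ret cnt taken prev seen p hp hlen ht0 ht2 hst
    have hpr : pvPid r = p := hp r (by simp)
    have hprs : ∀ x ∈ rs, pvPid x = p := fun x hx => hp x (by simp [hx])
    by_cases hb : min (2 - taken) (5 - (ret.length : Int)) = 0
    · -- budget exhausted at group entry: taken = 2, A skips the group
      have htk2 : taken = 2 := by omega
      rcases hst with ⟨_, ht⟩ | ⟨hpe, hct⟩
      · omega
      · have hlen5 : ret.length ≠ 5 := by omega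
        rw [hb, pvTakeB_zero, if_neg hlen5]
        refine ⟨hlen, cnt, prev, Or.inl rfl, ?_⟩
        rw [hpe]
        exact pvLoopA_skip (r :: rs) rest ret cnt seen p hp (by omega)
    · -- budget positive: A examines the row too
      have htk : taken ≤ 1 := by omega
      have hcond : ¬ (some (pvPid r) = prev ∧ cnt ≥ 2) := by
        rintro ⟨h1, h2⟩
        rcases hst with ⟨hne, _⟩ | ⟨_, hct⟩
        · exact hne (by rw [← h1, hpr])
        · omega
      simp only [List.cons_append, pvLoopA, hcond, if_false, pvTakeB, hb]
      have hcnt1 : (if some (pvPid r) ≠ prev then (0:Int) else cnt) = taken := by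
        rcases hst with ⟨hne, ht⟩ | ⟨hpe, hct⟩
        · rw [if_pos (by intro h1; exact hne (by rw [← h1, hpr])), ht]
        · rw [if_neg (by intro h1; exact h1 (by rw [hpr, hpe])), hct]
      rw [hcnt1]
      by_cases hmem : PySem.Set.contains seen (pvSent r)
      · -- duplicate: both sides skip the row unchanged
        simp only [hmem, if_true]
        have key := ih rest ret taken taken prev seen p hprs hlen ht0 ht2 ?stay
        case stay =>
          rcases hst with ⟨hne, ht⟩ | ⟨hpe, _⟩
          · exact Or.inl ⟨hne, ht⟩
          · exact Or.inr ⟨hpe, rfl⟩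
        exact key
      · simp only [hmem, Bool.false_eq_true, if_false]
        by_cases hfull : (ret ++ [r]).length ≥ 5
        · -- the append reaches the global cap: A returns; B's budget drops to 0
          have hlapp : (ret ++ [r]).length = ret.length + 1 := by simp
          have hlen4 : ret.length = 4 := by omega
          have hbm : min (2 - taken) (5 - (ret.length : Int)) - 1 = 0 := by
            rw [hlen4]; omega
          rw [hbm, pvTakeB_zero]
          have h5 : (ret ++ [r]).length = 5 := by omega
          simp [h5]
        · -- normal append: recurse with taken+1 and budget-1
          have hlapp : (ret ++ [r]).length = ret.length + 1 := by simp
          have hlen1 : (ret ++ [r]).length ≤ 4 := by omega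
          have hbm : min (2 - taken) (5 - (ret.length : Int)) - 1 =
              min (2 - (taken + 1)) (5 - (((ret ++ [r]).length : Int))) := by
            have h4 : ret.length ≤ 3 := by omega
            rw [hlapp]; push_cast; omega
          rw [hbm]
          have key := ih rest (ret ++ [r]) (taken + 1) (taken + 1) (some (pvPid r))
            (PySem.Set.add seen (pvSent r)) p hprs hlen1 (by omega) (by omega)
            (Or.inr ⟨by rw [hpr], rfl⟩)
          simp only [hfull, if_false]
          by_cases h5 : (pvTakeB rs (ret ++ [r]) (min (2 - (taken + 1)) (5 - (((ret ++ [r]).length : Int))))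
              (PySem.Set.add seen (pvSent r))).1.length = 5
          · rw [if_pos h5] at key ⊢
            exact key
          · rw [if_neg h5] at key ⊢
            obtain ⟨hle, c', p', hp', he⟩ := key
            refine ⟨hle, c', p', Or.inr ?_, he⟩
            rcases hp' with h | h
            · rw [h, hpr]
            · rw [h]

-- A's loop over the concatenation of the per-paper buckets equals B's outer loop
lemma pvLoopA_eq_pvLoopB (d : PySem.Dict String (List (List (String × String))))
    (ks : List String) :
    ∀ (ret : List (List (String × String))) (cnt : Int) (prev : Option String)
      (seen : PySem.Set String),
    ret.length ≤ 4 →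
    (∀ k ∈ ks, ∀ r ∈ d.getD k [], pvPid r = k) →
    ks.Pairwise (· ≠ ·) →
    (∀ k ∈ ks, prev ≠ some k) →
    pvLoopA ((ks.map (fun k => d.getD k [])).flatten) ret cnt prev seen =
      pvLoopB d ks ret seen := by
  induction ks with
  | nil => intro ret cnt prev seen _ _ _ _; rfl
  | cons k ks ih =>
    intro ret cnt prev seen hlen huni hpw hfr
    have key := pvLoopA_group (d.getD k []) ((ks.map (fun k => d.getD k [])).flatten)
      ret cnt 0 prev seen k (huni k (by simp)) hlen (by omega) (by omega)
      (Or.inl ⟨hfr k (by simp), rfl⟩)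
    have hmin : min (2 - (0:Int)) (5 - (ret.length : Int)) = min 2 (5 - (ret.length : Int)) := by
      norm_num
    rw [hmin] at key
    simp only [List.map_cons, List.flatten_cons, pvLoopB]
    by_cases h5 : (pvTakeB (d.getD k []) ret (min 2 (5 - (ret.length : Int))) seen).1.length = 5
    · rw [if_pos h5] at key ⊢
      exact key
    · rw [if_neg h5] at key ⊢
      obtain ⟨hle, c', p', hp', he⟩ := key
      rw [he]
      apply ih _ _ _ _ hle
      · exact fun k' hk' => huni k' (by simp [hk'])
      · exact hpw.sublist (List.sublist_cons_self _ _)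
      · intro k' hk'
        rcases hp' with h | h
        · rw [h]; exact hfr k' (by simp [hk'])
        · rw [h]
          intro hc
          exact (List.pairwise_cons.mp hpw).1 k' hk' (Option.some.inj hc)

-- stable insertion position: x goes after all c with before x c false,
-- before the first d with before x d true
lemma insertBy_split (before : List (String × String) → List (String × String) → Bool)
    (x : List (String × String)) :
    ∀ (C D : List (List (String × String))),
    (∀ c ∈ C, before x c = false) → (∀ e ∈ D, before x e = true) →
    PySem.List.insertBy before x (C ++ D) = C ++ x :: D := by
  intro C
  induction C with
  | nil =>
    intro D _ hD
    cases D with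
    | nil => rfl
    | cons e D' =>
      have := hD e (by simp)
      simp [PySem.List.insertBy, this]
  | cons c C' ih =>
    intro D hC hD
    have hc : before x c = false := hC c (by simp)
    simp only [List.cons_append, PySem.List.insertBy, hc, Bool.false_eq_true, if_false]
    rw [ih D (fun y hy => hC y (by simp [hy])) hD]

-- a stable sort by paper id is the concatenation, over the strictly increasing
-- list of paper ids, of the original-order runs of each id
lemma sorted_eq_flatten_filters (l : List (List (String × String))) :
    ∀ (ks : List String), ks.Pairwise (· < ·) → (∀ r ∈ l, pvPid r ∈ ks) →
    PySem.List.sorted l (fun r => pvPid r) false =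
      (ks.map (fun k => l.filter (fun r => pvPid r == k))).flatten := by
  induction l using List.reverseRecOn with
  | nil =>
    intro ks _ _
    simp [PySem.List.sorted_eq_foldl_insertBy]
  | append_singleton l r ih =>
    intro ks hks hmem
    have hrk : pvPid r ∈ ks := hmem r (by simp)
    obtain ⟨ks1, ks2, rfl⟩ := List.append_of_mem hrk
    have h1 : ∀ k ∈ ks1, k < pvPid r := by
      intro k hk
      have := (List.pairwise_append.mp hks).2.2 k hk (pvPid r) (by simp)
      exact this
    have h2 : ∀ k ∈ ks2, pvPid r < k := by
      intro k hk
      have := List.pairwise_cons.mp (List.pairwise_append.mp hks).2.1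
      exact this.1 k hk
    have ihl := ih (ks1 ++ pvPid r :: ks2) hks (fun x hx => hmem x (by simp [hx]))
    -- LHS: sorting l ++ [r] inserts r into sorted l
    have hL : PySem.List.sorted (l ++ [r]) (fun r => pvPid r) false =
        PySem.List.insertBy (fun a b => decide (pvPid a < pvPid b)) r
          (PySem.List.sorted l (fun r => pvPid r) false) := by
      rw [PySem.List.sorted_eq_foldl_insertBy, PySem.List.sorted_eq_foldl_insertBy,
        List.foldl_append]
      rfl
    rw [hL, ihl]
    -- split the flatten at the run of pvPid r
    have hsplit : ((ks1 ++ pvPid r :: ks2).map (fun k => l.filter (fun r' => pvPid r' == k))).flatten =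
        ((ks1.map (fun k => l.filter (fun r' => pvPid r' == k))).flatten ++
          l.filter (fun r' => pvPid r' == pvPid r)) ++
        (ks2.map (fun k => l.filter (fun r' => pvPid r' == k))).flatten := by
      simp [List.flatten_append]
    rw [hsplit]
    have hpidC : ∀ c ∈ (ks1.map (fun k => l.filter (fun r' => pvPid r' == k))).flatten ++
        l.filter (fun r' => pvPid r' == pvPid r),
        (fun a b => decide (pvPid a < pvPid b)) r c = false := by
      intro c hc
      rcases List.mem_append.mp hc with hc | hc
      · obtain ⟨gl, hgl, hcg⟩ := List.mem_flatten.mp hc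
        obtain ⟨k, hk, rfl⟩ := List.mem_map.mp hgl
        have : pvPid c = k := by
          have := (List.mem_filter.mp hcg).2
          exact eq_of_beq this
        simp only [decide_eq_false_iff_not, not_lt]
        rw [this]
        exact le_of_lt (h1 k hk)
      · have : pvPid c = pvPid r := by
          have := (List.mem_filter.mp hc).2
          exact eq_of_beq this
        simp [this]
    have hpidD : ∀ e ∈ (ks2.map (fun k => l.filter (fun r' => pvPid r' == k))).flatten,
        (fun a b => decide (pvPid a < pvPid b)) r e = true := by
      intro e he
      obtain ⟨gl, hgl, heg⟩ := List.mem_flatten.mp he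
      obtain ⟨k, hk, rfl⟩ := List.mem_map.mp hgl
      have : pvPid e = k := by
        have := (List.mem_filter.mp heg).2
        exact eq_of_beq this
      simp only [decide_eq_true_eq]
      rw [this]
      exact h2 k hk
    rw [insertBy_split _ r _ _ hpidC hpidD]
    -- RHS: the appended row lands exactly in the pvPid r run
    have hF1 : ∀ k ∈ ks1, (l ++ [r]).filter (fun r' => pvPid r' == k) =
        l.filter (fun r' => pvPid r' == k) := by
      intro k hk
      rw [List.filter_append]
      have : (pvPid r == k) = false := by
        simp only [beq_eq_false_iff_ne, ne_eq]
        intro h; rw [h] at h1; exact absurd (h1 k hk) (lt_irrefl k)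
      simp [this]
    have hF2 : ∀ k ∈ ks2, (l ++ [r]).filter (fun r' => pvPid r' == k) =
        l.filter (fun r' => pvPid r' == k) := by
      intro k hk
      rw [List.filter_append]
      have : (pvPid r == k) = false := by
        simp only [beq_eq_false_iff_ne, ne_eq]
        intro h; rw [h] at h2; exact absurd (h2 k hk) (lt_irrefl k)
      simp [this]
    have hF0 : (l ++ [r]).filter (fun r' => pvPid r' == pvPid r) =
        l.filter (fun r' => pvPid r' == pvPid r) ++ [r] := by
      rw [List.filter_append]
      simp
    rw [List.map_append, List.map_cons, List.flatten_append, List.flatten_cons,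
      List.map_congr_left hF1, List.map_congr_left hF2, hF0]
    simp

-- each bucket of the dict holds, in original order, the rows with that paper id
lemma pvBuckets_getD (ctx_list : List (List (String × String))) (k : String) :
    (pvBuckets ctx_list).getD k [] = ctx_list.filter (fun r => pvPid r == k) := by
  unfold pvBuckets
  have hfm : ctx_list.foldl (fun d r => d.modify (pvPid r) [] (fun v => v ++ [r]))
        PySem.Dict.empty =
      (ctx_list.map (fun r => (pvPid r, r))).foldl
        (fun d p => d.modify p.1 [] (fun v => v ++ [p.2])) PySem.Dict.empty := by
    rw [List.foldl_map]
  rw [hfm, PySem.Dict.getD_foldl_modify_append]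
  rw [List.filter_map, List.map_map]
  simp [Function.comp_def]

-- the dict's keys are the distinct paper ids in first-occurrence order
lemma pvBuckets_keys (ctx_list : List (List (String × String))) :
    (pvBuckets ctx_list).keys = PySem.Set.ofList (ctx_list.map (fun r => pvPid r)) := by
  unfold pvBuckets
  rw [PySem.Dict.keys_foldl_modify_key ctx_list (fun r => pvPid r) []
    (fun _ r => (fun v => v ++ [r])) PySem.Dict.empty]
  simp [PySem.Set.update_nil_left]

-- ===== VERDICT (by name: the statement is the Claim_ definition above) =====
theorem process_ctx_list_spec : Claim_equal_process_ctx_list := by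
  unfold Claim_equal_process_ctx_list
  intro ctx_list _ _
  unfold Spec_process_ctx_list process_ctx_list process_ctx_list_alt
  have hkeys := pvBuckets_keys ctx_list
  set d := pvBuckets ctx_list with hd
  set ks := PySem.List.sorted (PySem.Dict.keys d) (fun k => k) false with hks
  have hlt : ks.Pairwise (· < ·) := by
    rw [hks, hkeys]
    exact PySem.List.sorted_ofList_pairwise_lt _
  have hmem : ∀ r ∈ ctx_list, pvPid r ∈ ks := by
    intro r hr
    rw [hks, PySem.List.mem_sorted, hkeys, PySem.Set.mem_ofList]
    exact List.mem_map.mpr ⟨r, hr, rfl⟩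
  have hflat : PySem.List.sorted ctx_list (fun r => pvPid r) false =
      (ks.map (fun k => d.getD k [])).flatten := by
    rw [sorted_eq_flatten_filters ctx_list ks hlt hmem]
    congr 1
    apply List.map_congr_left
    intro k _
    rw [pvBuckets_getD]
  rw [hflat]
  exact pvLoopA_eq_pvLoopB d ks [] 0 none [] (by simp)
    (by
      intro k _ r hrk
      rw [pvBuckets_getD] at hrk
      exact eq_of_beq (List.mem_filter.mp hrk).2)
    (hlt.imp ne_of_lt)
    (by intro k _ h; cases h)
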